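-- pv_equiv track=rewrite | github.com/poppopjmp/spiderfoot | spiderfoot/agents/iac_advisor.py | _build_bundle_text
-- ===== SOURCE A (Python) =====
-- from typing import Any, Dict, List
--
-- def _build_bundle_text(bundle: Dict[str, Any], files: Dict[str, Any]) -> str:
--     """
--     Flatten the IaC bundle into a readable text block for the LLM.
--     Includes file-path headings and truncates very large files.
--     """
--     MAX_FILE_CHARS = 6_000  # keep total prompt manageable
--     MAX_TOTAL_CHARS = 40_000
--
--     lines: List[str] = []
--     total = 0
--
--     for category, category_files in bundle.items():
--         if not isinstance(category_files, dict):
--             continue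
--         for filename, content in category_files.items():
--             if not isinstance(content, str):
--                 continue
--             heading = f"\n{'='*60}\n# {category}/{filename}\n{'='*60}\n"
--             snippet = content[:MAX_FILE_CHARS]
--             if len(content) > MAX_FILE_CHARS:
--                 snippet += f"\n... [{len(content) - MAX_FILE_CHARS} chars truncated]"
--             entry = heading + snippet
--             total += len(entry)
--             if total > MAX_TOTAL_CHARS:
--                 lines.append(f"\n[Bundle truncated at {MAX_TOTAL_CHARS} chars to fit context window]")
--                 break
--             lines.append(entry)
--
--     return "".join(lines) if lines else "(empty bundle)"
-- ===== SOURCE B (Python) =====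
-- def _build_bundle_text(bundle, files):
--     """Two-phase rewrite: format every file into grouped entry strings first,
--     then run a separate per-category budgeting pass over the formatted groups."""
--     MAX_FILE_CHARS = 6_000
--     MAX_TOTAL_CHARS = 40_000
--     bar = '=' * 60
--
--     def fmt(category, filename, content):
--         if len(content) <= MAX_FILE_CHARS:
--             body = content
--         else:
--             body = content[:MAX_FILE_CHARS] + "\n... [%d chars truncated]" % (len(content) - MAX_FILE_CHARS)
--         return ("\n%s\n# %s/%s\n%s\n" % (bar, category, filename, bar)) + body
--
--     groups = [
--         [fmt(category, fn, content) for fn, content in cf.items() if isinstance(content, str)]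
--         for category, cf in bundle.items()
--         if isinstance(cf, dict)
--     ]
--
--     def take(total, group):
--         chunk = []
--         for entry in group:
--             total += len(entry)
--             if total > MAX_TOTAL_CHARS:
--                 chunk.append("\n[Bundle truncated at %d chars to fit context window]" % MAX_TOTAL_CHARS)
--                 break
--             chunk.append(entry)
--         return chunk, total
--
--     out = []
--     total = 0
--     for group in groups:
--         chunk, total = take(total, group)
--         out.extend(chunk)
--     return "".join(out) if out else "(empty bundle)"
-- ===== Notes on version B (the rewrite author's own statement) =====
-- stated objective: alternative
-- what changed: A interleaves formatting and budget accounting in one nested loop over the raw bundle; B first formats every file into grouped entry strings (nested comprehension over the bundle), then a separate per-category budgeting pass consumes the preformatted groups and concatenates their chunks.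
import Mathlib
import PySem

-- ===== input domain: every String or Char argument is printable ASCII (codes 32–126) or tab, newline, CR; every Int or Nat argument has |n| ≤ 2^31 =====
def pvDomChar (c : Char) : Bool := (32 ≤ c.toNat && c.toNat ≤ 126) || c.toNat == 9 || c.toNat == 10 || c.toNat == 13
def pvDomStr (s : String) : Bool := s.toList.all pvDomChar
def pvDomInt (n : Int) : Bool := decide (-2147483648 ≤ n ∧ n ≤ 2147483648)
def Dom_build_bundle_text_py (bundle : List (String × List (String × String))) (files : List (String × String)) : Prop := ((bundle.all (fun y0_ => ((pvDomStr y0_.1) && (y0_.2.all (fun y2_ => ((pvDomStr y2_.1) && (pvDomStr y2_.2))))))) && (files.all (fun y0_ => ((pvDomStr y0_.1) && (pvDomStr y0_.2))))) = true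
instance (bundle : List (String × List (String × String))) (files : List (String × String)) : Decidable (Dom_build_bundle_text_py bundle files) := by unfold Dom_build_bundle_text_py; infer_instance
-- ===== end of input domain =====

-- B reformulates A as two phases — format all files into grouped entry strings, then a separate per-category budgeting pass — same return value (alternative decomposition, not faster).


-- ===== PORT A =====
-- '='*60
def pvBar : String := String.ofList (List.replicate 60 '=')

def pvNotice : String := "\n[Bundle truncated at 40000 chars to fit context window]"

-- A's inner 'for filename, content in category_files.items()' loop with its break;
-- state = (lines, total); isinstance(content, str) is always true under the type convention.
def pvInnerA (category : String) : List (String × String) → List String → Int → (List String × Int)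
  | [], lines, total => (lines, total)
  | (filename, content) :: rest, lines, total =>
    let heading := "\n" ++ pvBar ++ "\n# " ++ category ++ "/" ++ filename ++ "\n" ++ pvBar ++ "\n"
    let snippet := PySem.Str.slice content none (some 6000)
    let snippet := if PySem.Str.len content > 6000 then
        snippet ++ "\n... [" ++ PySem.Int.toStr (PySem.Str.len content - 6000) ++ " chars truncated]"
      else snippet
    let entry := heading ++ snippet
    let total := total + PySem.Str.len entry
    if total > 40000 then (lines ++ [pvNotice], total)
    else pvInnerA category rest (lines ++ [entry]) total

-- A's outer 'for category, category_files in bundle.items()' loop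
def pvOuterA : List (String × List (String × String)) → List String → Int → List String
  | [], lines, _ => lines
  | (category, category_files) :: rest, lines, total =>
    match pvInnerA category category_files lines total with
    | (lines', total') => pvOuterA rest lines' total'

def build_bundle_text_py (bundle : List (String × List (String × String))) (files : List (String × String)) : String :=
  let lines := pvOuterA bundle [] 0
  if lines.isEmpty then "(empty bundle)" else PySem.Str.join "" lines

-- ===== PORT B =====
-- Source B's fmt: the fully formatted entry for one file
def pvFmtB (category filename content : String) : String :=
  let body := if PySem.Str.len content ≤ 6000 then content
    else PySem.Str.slice content none (some 6000) ++ "\n... [" ++ PySem.Int.toStr (PySem.Str.len content - 6000) ++ " chars truncated]"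
  ("\n" ++ pvBar ++ "\n# " ++ category ++ "/" ++ filename ++ "\n" ++ pvBar ++ "\n") ++ body

-- Source B's take(total, group): chunk of the group that fits the budget (plus the notice on overflow)
def pvTakeB : Int → List String → List String → (List String × Int)
  | total, [], chunk => (chunk, total)
  | total, entry :: rest, chunk =>
    let total := total + PySem.Str.len entry
    if total > 40000 then (chunk ++ [pvNotice], total)
    else pvTakeB total rest (chunk ++ [entry])

-- Source B's final loop: 'for group in groups: chunk, total = take(total, group); out.extend(chunk)'
def pvBudgetB : Int → List (List String) → List String → List String
  | _, [], out => out
  | total, g :: gs, out =>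
    match pvTakeB total g [] with
    | (chunk, total') => pvBudgetB total' gs (out ++ chunk)

def build_bundle_text_py_alt (bundle : List (String × List (String × String))) (files : List (String × String)) : String :=
  let groups := bundle.map (fun p => p.2.map (fun q => pvFmtB p.1 q.1 q.2))
  let out := pvBudgetB 0 groups []
  if out.isEmpty then "(empty bundle)" else PySem.Str.join "" out

-- ===== PRECONDITION & SPEC =====
def Spec_build_bundle_text_py (bundle : List (String × List (String × String))) (files : List (String × String)) (out : String) : Prop := out = build_bundle_text_py_alt bundle files
instance (bundle : List (String × List (String × String))) (files : List (String × String)) (out : String) : Decidable (Spec_build_bundle_text_py bundle files out) := by unfold Spec_build_bundle_text_py; infer_instance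

-- ===== CLAIM (what is proved, stated in full; the proofs are below) =====
def Claim_equal_build_bundle_text_py : Prop := ∀ (bundle : List (String × List (String × String))) (files : List (String × String)), Dom_build_bundle_text_py bundle files → Spec_build_bundle_text_py bundle files (build_bundle_text_py bundle files)

-- ===== LEMMAS AND PROOFS =====

-- content[:6000] is content itself when len(content) ≤ 6000
theorem pv_slice_full (s : String) (h : PySem.Str.len s ≤ 6000) :
    PySem.Str.slice s none (some 6000) = s := by
  apply String.toList_inj.mp
  have h' : s.toList.length ≤ 6000 := by
    rw [String.length_toList]; simp [pysem] at h; omega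
  simp [pysem, PySem.Str.slice, List.take_of_length_le h']

-- B's fmt equals A's heading ++ snippet
theorem pv_fmt_eq (category filename content : String) :
    pvFmtB category filename content =
      ("\n" ++ pvBar ++ "\n# " ++ category ++ "/" ++ filename ++ "\n" ++ pvBar ++ "\n") ++
      (if PySem.Str.len content > 6000 then
          PySem.Str.slice content none (some 6000) ++ "\n... [" ++ PySem.Int.toStr (PySem.Str.len content - 6000) ++ " chars truncated]"
        else PySem.Str.slice content none (some 6000)) := by
  unfold pvFmtB
  by_cases h : PySem.Str.len content ≤ 6000
  · rw [if_pos h, if_neg (by omega), pv_slice_full content h]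
  · rw [if_neg h, if_pos (by omega)]

-- pvTakeB's chunk accumulator factors out
theorem pv_take_acc (g : List String) (total : Int) (chunk : List String) :
    pvTakeB total g chunk = (chunk ++ (pvTakeB total g []).1, (pvTakeB total g []).2) := by
  induction g generalizing total chunk with
  | nil => simp [pvTakeB]
  | cons e rest ih =>
    simp only [pvTakeB]
    split_ifs with h
    · simp
    · rw [ih _ (chunk ++ [e]), ih _ ([] ++ [e])]; simp

-- A's inner loop = B's take over the preformatted group
theorem pv_inner_eq (category : String) (items : List (String × String)) (lines : List String) (total : Int) :
    pvInnerA category items lines total =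
      (lines ++ (pvTakeB total (items.map (fun q => pvFmtB category q.1 q.2)) []).1,
       (pvTakeB total (items.map (fun q => pvFmtB category q.1 q.2)) []).2) := by
  induction items generalizing lines total with
  | nil => simp [pvInnerA, pvTakeB]
  | cons it rest ih =>
    obtain ⟨fn, content⟩ := it
    simp only [pvInnerA, List.map_cons, pvTakeB, pv_fmt_eq]
    split_ifs with h h2 h2
    · simp
    · rw [ih, pv_take_acc _ _ ([] ++ _)]
      simp only [List.nil_append, List.append_assoc, pv_fmt_eq]
    · simp
    · rw [ih, pv_take_acc _ _ ([] ++ _)]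
      simp only [List.nil_append, List.append_assoc, pv_fmt_eq]

-- pvBudgetB's out accumulator factors out
theorem pv_budget_acc (gs : List (List String)) (total : Int) (out : List String) :
    pvBudgetB total gs out = out ++ pvBudgetB total gs [] := by
  induction gs generalizing total out with
  | nil => simp [pvBudgetB]
  | cons g rest ih =>
    rcases hp : pvTakeB total g [] with ⟨chunk, t'⟩
    simp only [pvBudgetB, hp]
    rw [ih _ (out ++ chunk), ih _ ([] ++ chunk)]; simp

-- A's outer loop = B's budgeting pass over the preformatted groups
theorem pv_outer_eq (bundle : List (String × List (String × String))) (lines : List String) (total : Int) :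
    pvOuterA bundle lines total =
      lines ++ pvBudgetB total (bundle.map (fun p => p.2.map (fun q => pvFmtB p.1 q.1 q.2))) [] := by
  induction bundle generalizing lines total with
  | nil => simp [pvOuterA, pvBudgetB]
  | cons p rest ih =>
    obtain ⟨category, cf⟩ := p
    simp only [pvOuterA, List.map_cons, pvBudgetB, pv_inner_eq]
    rw [ih, pv_budget_acc _ _ ([] ++ _)]
    simp


-- ===== VERDICT (by name: the statement is the Claim_ definition above) =====
theorem build_bundle_text_py_spec : Claim_equal_build_bundle_text_py := by
  intro bundle files _
  unfold Spec_build_bundle_text_py build_bundle_text_py build_bundle_text_py_alt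
  rw [pv_outer_eq]
  simp
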